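-- pv_equiv track=rewrite | github.com/Aasthaengg/IBMdataset | Python_codes/p02270/s713325895.py | check
-- ===== SOURCE A (Python) =====
-- import math
--
-- def check(w, k, p1, p2):
--     if k==1:
--         return p2
--     if p2 - p1 == 1:
--         if get_trunk_No(w, p1) == k:
--             return max(p1,max(w))
--         else:
--             return max(p2,max(w))
--     m = math.ceil((p1+p2)/2)
--     trunk_no = get_trunk_No(w,m)
--     if trunk_no > k:
--         return check(w, k, m, p2)
--     else:
--         return check(w, k, p1, m)
--
-- def get_trunk_No(w,m):
--     temp = 0
--     trunk_no = 1
--     for i in w: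
--         if temp + i <= m:
--             temp += i
--             if temp == m:
--                 trunk_no += 1
--                 temp = 0
--         else:
--             trunk_no += 1
--             temp = i
--     if temp==0:
--         trunk_no-=1
--     return trunk_no
-- ===== SOURCE B (Python) =====
-- def get_trunk_No(w, m):
--     temp = 0
--     trunk_no = 1
--     for i in w:
--         if temp + i <= m:
--             temp += i
--             if temp == m:
--                 trunk_no += 1
--                 temp = 0
--         else:
--             trunk_no += 1
--             temp = i
--     if temp == 0:
--         trunk_no -= 1
--     return trunk_no
--
--
-- def check(w, k, p1, p2):
--     # iterative binary search over the same interval narrowing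
--     if k == 1:
--         return p2
--     while p2 - p1 > 1:
--         m = (p1 + p2 + 1) // 2  # == math.ceil((p1+p2)/2) for ints
--         if get_trunk_No(w, m) > k:
--             p1 = m
--         else:
--             p2 = m
--     big = max(w)
--     return max(p1, big) if get_trunk_No(w, p1) == k else max(p2, big)
-- ===== Notes on version B (the rewrite author's own statement) =====
-- stated objective: alternative
-- what changed: The recursive binary search over the capacity interval is replaced by an iterative while-loop that narrows (p1,p2) with the same ceil midpoint and evaluates the base case once after the loop; the greedy truck counter is unchanged.
import Mathlib
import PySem

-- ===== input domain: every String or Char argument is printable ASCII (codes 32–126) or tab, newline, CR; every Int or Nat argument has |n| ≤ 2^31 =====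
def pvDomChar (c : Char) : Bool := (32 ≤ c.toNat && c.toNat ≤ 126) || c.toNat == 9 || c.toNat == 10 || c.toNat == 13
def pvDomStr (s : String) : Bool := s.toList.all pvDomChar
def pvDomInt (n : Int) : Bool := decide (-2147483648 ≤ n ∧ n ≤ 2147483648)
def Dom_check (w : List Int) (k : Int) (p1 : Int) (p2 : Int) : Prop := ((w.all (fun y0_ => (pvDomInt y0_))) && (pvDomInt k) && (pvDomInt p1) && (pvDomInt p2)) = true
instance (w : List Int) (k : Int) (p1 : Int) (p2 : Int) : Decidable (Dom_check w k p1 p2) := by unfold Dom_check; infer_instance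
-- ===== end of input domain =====

-- B replaces A's recursive interval narrowing by an iterative (tail-recursive) binary-search
-- loop with the same midpoint rule; same greedy truck-counting helper (objective: alternative
-- decomposition, same cost).

-- shared helper: literal port of get_trunk_No (the greedy truck counter, identical in Source A and Source B)
def getTrunkNo (w : List Int) (m : Int) : Int :=
  let s := w.foldl
    (fun (st : Int × Int) i =>
      if st.1 + i ≤ m then
        if st.1 + i = m then (0, st.2 + 1) else (st.1 + i, st.2)
      else (i, st.2 + 1))
    (0, 1)
  if s.1 = 0 then s.2 - 1 else s.2

-- midpoint bounds, needed for termination of both ports (cited in decreasing_by)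
theorem pvMidBounds (p1 p2 : Int) (h : 2 ≤ p2 - p1) :
    p1 < PySem.Int.floordiv (p1 + p2 + 1) 2 ∧ PySem.Int.floordiv (p1 + p2 + 1) 2 < p2 := by
  rw [PySem.Int.floordiv_eq_ediv_of_pos (by omega : (0:Int) < 2)]
  omega

-- ===== PORT A =====
-- literal port of A's recursion; math.ceil((p1+p2)/2) = floordiv (p1+p2+1) 2 exactly on Dom
-- (|p1+p2| ≤ 2^33 < 2^53, so the float division is exact).  On empty w Python's max(w) raises
-- (ValueError) and on k ≠ 1, p2 - p1 < 1 the recursion never terminates (RecursionError):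
-- both return 0 here and are excluded by Pre_check.
def check (w : List Int) (k : Int) (p1 : Int) (p2 : Int) : Int :=
  if k = 1 then p2
  else if p2 - p1 = 1 then
    match PySem.List.max? w (fun x => x) with
    | some mx => if getTrunkNo w p1 = k then max p1 mx else max p2 mx
    | none => 0
  else if h : 2 ≤ p2 - p1 then
    if getTrunkNo w (PySem.Int.floordiv (p1 + p2 + 1) 2) > k then
      check w k (PySem.Int.floordiv (p1 + p2 + 1) 2) p2
    else
      check w k p1 (PySem.Int.floordiv (p1 + p2 + 1) 2)
  else 0
termination_by (p2 - p1).toNat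
decreasing_by
  · have := pvMidBounds p1 p2 h; omega
  · have := pvMidBounds p1 p2 h; omega

-- ===== PORT B =====
-- Source B's while loop as a tail recursion on the pair (p1, p2)
def bsLoop (w : List Int) (k : Int) (p1 : Int) (p2 : Int) : Int × Int :=
  if h : p2 - p1 > 1 then
    if getTrunkNo w (PySem.Int.floordiv (p1 + p2 + 1) 2) > k then
      bsLoop w k (PySem.Int.floordiv (p1 + p2 + 1) 2) p2
    else
      bsLoop w k p1 (PySem.Int.floordiv (p1 + p2 + 1) 2)
  else (p1, p2)
termination_by (p2 - p1).toNat
decreasing_by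
  · have := pvMidBounds p1 p2 (by omega); omega
  · have := pvMidBounds p1 p2 (by omega); omega

-- literal port of Source B's check; max(w) on empty w raises in Python (excluded by Pre_check), getD 0 here
def check_alt (w : List Int) (k : Int) (p1 : Int) (p2 : Int) : Int :=
  if k = 1 then p2
  else
    let r := bsLoop w k p1 p2
    let big := (PySem.List.max? w (fun x => x)).getD 0
    if getTrunkNo w r.1 = k then max r.1 big else max r.2 big

-- ===== PRECONDITION & SPEC =====
-- Pre_ excludes exactly the inputs where Python's A does not return: with k ≠ 1 it needs a
-- nonempty w (max(w) raises ValueError at the base case) and p2 - p1 ≥ 1 (otherwise the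
-- recursive interval narrowing never terminates: RecursionError).
def Pre_check (w : List Int) (k : Int) (p1 : Int) (p2 : Int) : Prop :=
  k = 1 ∨ (1 ≤ p2 - p1 ∧ w ≠ [])
instance (w : List Int) (k : Int) (p1 : Int) (p2 : Int) : Decidable (Pre_check w k p1 p2) := by
  unfold Pre_check; infer_instance
def pvWitness_check : List Int × Int × Int × Int := ([3, 1, 4, 2], 2, 1, 10)

def Spec_check (w : List Int) (k : Int) (p1 : Int) (p2 : Int) (out : Int) : Prop := out = check_alt w k p1 p2
instance (w : List Int) (k : Int) (p1 : Int) (p2 : Int) (out : Int) : Decidable (Spec_check w k p1 p2 out) := by unfold Spec_check; infer_instance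

-- ===== CLAIM (what is proved, stated in full; the proofs are below) =====
def Claim_equal_check : Prop := ∀ (w : List Int) (k : Int) (p1 : Int) (p2 : Int), Dom_check w k p1 p2 → Pre_check w k p1 p2 → Spec_check w k p1 p2 (check w k p1 p2)

-- ===== LEMMAS AND PROOFS =====

theorem check_eq_alt (n : Nat) : ∀ (w : List Int) (k : Int) (p1 : Int) (p2 : Int),
    (p2 - p1).toNat ≤ n → k ≠ 1 → 1 ≤ p2 - p1 → w ≠ [] →
    check w k p1 p2 = check_alt w k p1 p2 := by
  induction n with
  | zero => intro w k p1 p2 hn _ h1 _; omega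
  | succ n ih =>
    intro w k p1 p2 hn hk h1 hw
    by_cases hbase : p2 - p1 = 1
    · rw [check, check_alt, bsLoop]
      cases hmax : PySem.List.max? w (fun x => x) with
      | none => exact absurd ((PySem.List.max?_eq_none_iff w (fun x => x)).mp hmax) hw
      | some mx => simp [hk, hbase]
    · have h2 : 2 ≤ p2 - p1 := by omega
      have hm := pvMidBounds p1 p2 h2
      rw [check, check_alt, bsLoop]
      simp only [if_neg hk, if_neg hbase, dif_pos h2, dif_pos (by omega : p2 - p1 > 1)]
      by_cases hc : getTrunkNo w (PySem.Int.floordiv (p1 + p2 + 1) 2) > k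
      · simp only [if_pos hc]
        rw [ih w k _ p2 (by omega) hk (by omega) hw, check_alt, if_neg hk]
      · simp only [if_neg hc]
        rw [ih w k p1 _ (by omega) hk (by omega) hw, check_alt, if_neg hk]

-- ===== VERDICT (by name: the statement is the Claim_ definition above) =====
theorem check_spec : Claim_equal_check := by
  intro w k p1 p2 _ hpre
  unfold Spec_check
  by_cases hk : k = 1
  · rw [check, check_alt]; simp [hk]
  · rcases hpre with h | ⟨h1, hw⟩
    · exact absurd h hk
    · exact check_eq_alt (p2 - p1).toNat w k p1 p2 le_rfl hk h1 hw
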